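-- pv_equiv track=rewrite | github.com/poojasalecha/customer_distribution | src/distribution/customer/utils.py | get_customer_order_count
-- ===== SOURCE A (Python) =====
-- def get_customer_order_count(customer_order_count):
-- 	"""get the list of customer names by their total orders"""
-- 	once = []
-- 	twice = []
-- 	thrice = []
-- 	fourtimes = []
-- 	higher = []
-- 	for key, value in customer_order_count.items():
-- 		if value['count'] == 1:
-- 			once.append(key)
-- 		if value['count'] == 2:
-- 			twice.append(key)
-- 		if value['count'] == 3:
-- 			thrice.append(key)
-- 		if value['count'] == 4:
-- 			fourtimes.append(key)
-- 		if value['count'] > 4: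
-- 			higher.append(key)
-- 	return once, twice, thrice, fourtimes, higher
-- ===== SOURCE B (Python) =====
-- def get_customer_order_count(customer_order_count):
--     """get the list of customer names by their total orders"""
--     def names(pred):
--         return [key for key, value in customer_order_count.items() if pred(value['count'])]
--     return (names(lambda c: c == 1),
--             names(lambda c: c == 2),
--             names(lambda c: c == 3),
--             names(lambda c: c == 4),
--             names(lambda c: c > 4))
-- ===== Notes on version B (the rewrite author's own statement) =====
-- stated objective: simpler
-- what changed: B replaces A's single pass with five mutable accumulator lists by five independent staged filter passes (one comprehension per bucket), correct because the buckets are disjoint predicates over the same items.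
import Mathlib
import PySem

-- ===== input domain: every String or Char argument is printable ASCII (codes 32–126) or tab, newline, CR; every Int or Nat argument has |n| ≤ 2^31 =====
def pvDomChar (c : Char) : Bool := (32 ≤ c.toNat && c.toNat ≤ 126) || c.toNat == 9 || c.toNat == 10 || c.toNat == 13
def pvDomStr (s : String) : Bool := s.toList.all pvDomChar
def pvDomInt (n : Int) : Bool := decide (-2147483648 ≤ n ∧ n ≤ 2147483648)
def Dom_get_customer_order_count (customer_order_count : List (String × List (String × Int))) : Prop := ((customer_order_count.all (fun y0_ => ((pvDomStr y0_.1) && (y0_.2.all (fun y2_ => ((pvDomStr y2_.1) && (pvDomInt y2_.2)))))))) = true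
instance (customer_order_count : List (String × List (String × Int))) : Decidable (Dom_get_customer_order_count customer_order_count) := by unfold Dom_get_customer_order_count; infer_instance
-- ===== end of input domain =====

-- B restructures A's single pass with five mutable accumulators into five independent filter passes, one per bucket (objective: simpler).
-- The parameter is a dict of dicts, ported as association lists. value['count'] raises KeyError when absent: Pre_ excludes that.

-- ===== PORT A =====
-- value['count'] as first-match association-list lookup (none = KeyError)
def pvLookupCount (value : List (String × Int)) : Option Int :=
  (value.find? (fun p => p.1 == "count")).map (·.2)

def get_customer_order_count (customer_order_count : List (String × List (String × Int))) : List String × List String × List String × List String × List String :=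
  customer_order_count.foldl
    (fun (st : List String × List String × List String × List String × List String) kv =>
      let (once, twice, thrice, fourtimes, higher) := st
      match pvLookupCount kv.2 with
      | none => st   -- Python raises KeyError here; excluded by Pre_
      | some c =>
        let once := if c = 1 then once ++ [kv.1] else once
        let twice := if c = 2 then twice ++ [kv.1] else twice
        let thrice := if c = 3 then thrice ++ [kv.1] else thrice
        let fourtimes := if c = 4 then fourtimes ++ [kv.1] else fourtimes
        let higher := if c > 4 then higher ++ [kv.1] else higher
        (once, twice, thrice, fourtimes, higher))
    ([], [], [], [], [])

-- ===== PORT B =====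
-- one filter pass: keys whose 'count' satisfies the predicate (missing key = KeyError in Python; excluded by Pre_)
def pvNames (customer_order_count : List (String × List (String × Int))) (pred : Int → Bool) : List String :=
  customer_order_count.filterMap (fun kv =>
    match pvLookupCount kv.2 with
    | none => none
    | some c => if pred c then some kv.1 else none)

def get_customer_order_count_alt (customer_order_count : List (String × List (String × Int))) : List String × List String × List String × List String × List String :=
  (pvNames customer_order_count (fun c => c == 1),
   pvNames customer_order_count (fun c => c == 2),
   pvNames customer_order_count (fun c => c == 3),
   pvNames customer_order_count (fun c => c == 4),
   pvNames customer_order_count (fun c => c > 4))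

-- ===== PRECONDITION & SPEC =====
-- Pre_: every customer's dict has a 'count' key (otherwise A raises KeyError)
def Pre_get_customer_order_count (customer_order_count : List (String × List (String × Int))) : Prop :=
  ∀ kv ∈ customer_order_count, "count" ∈ kv.2.map (·.1)
instance (customer_order_count : List (String × List (String × Int))) : Decidable (Pre_get_customer_order_count customer_order_count) := by unfold Pre_get_customer_order_count; infer_instance
def pvWitness_get_customer_order_count : (List (String × List (String × Int))) := [("alice", [("count", 2)]), ("bob", [("count", 7)])]

def Spec_get_customer_order_count (customer_order_count : List (String × List (String × Int))) (out : List String × List String × List String × List String × List String) : Prop := out = get_customer_order_count_alt customer_order_count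
instance (customer_order_count : List (String × List (String × Int))) (out : List String × List String × List String × List String × List String) : Decidable (Spec_get_customer_order_count customer_order_count out) := by unfold Spec_get_customer_order_count; infer_instance

-- ===== CLAIM (what is proved, stated in full; the proofs are below) =====
def Claim_equal_get_customer_order_count : Prop := ∀ (customer_order_count : List (String × List (String × Int))), Dom_get_customer_order_count customer_order_count → Pre_get_customer_order_count customer_order_count → Spec_get_customer_order_count customer_order_count (get_customer_order_count customer_order_count)

-- ===== LEMMAS AND PROOFS =====

-- helper: appending-before vs consing-into-the-tail of a conditional append
theorem app_if (b : Prop) [Decidable b] (l m : List String) (k : String) :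
    (if b then l ++ [k] else l) ++ m = l ++ (if b then k :: m else m) := by
  split_ifs <;> simp

-- unfolding one step of the filter pass
theorem pvNames_cons (kv : String × List (String × Int)) (rest : List (String × List (String × Int))) (p : Int → Bool) :
    pvNames (kv :: rest) p
      = match pvLookupCount kv.2 with
        | none => pvNames rest p
        | some c => if p c then kv.1 :: pvNames rest p else pvNames rest p := by
  cases h : pvLookupCount kv.2 <;> simp [pvNames, List.filterMap_cons, h] <;> split_ifs <;> simp

-- Invariant: A's fold from an arbitrary state appends exactly B's five filtered lists.
theorem foldA_eq (xs : List (String × List (String × Int)))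
    (o t th fo hi : List String) :
    xs.foldl
      (fun (st : List String × List String × List String × List String × List String) kv =>
        let (once, twice, thrice, fourtimes, higher) := st
        match pvLookupCount kv.2 with
        | none => st
        | some c =>
          let once := if c = 1 then once ++ [kv.1] else once
          let twice := if c = 2 then twice ++ [kv.1] else twice
          let thrice := if c = 3 then thrice ++ [kv.1] else thrice
          let fourtimes := if c = 4 then fourtimes ++ [kv.1] else fourtimes
          let higher := if c > 4 then higher ++ [kv.1] else higher
          (once, twice, thrice, fourtimes, higher)) (o, t, th, fo, hi)
    = (o ++ pvNames xs (fun c => c == 1),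
       t ++ pvNames xs (fun c => c == 2),
       th ++ pvNames xs (fun c => c == 3),
       fo ++ pvNames xs (fun c => c == 4),
       hi ++ pvNames xs (fun c => c > 4)) := by
  induction xs generalizing o t th fo hi with
  | nil => simp [pvNames]
  | cons kv rest ih =>
    cases h : pvLookupCount kv.2 with
    | none =>
      simp only [List.foldl_cons, h]
      rw [ih]
      simp [pvNames_cons, h]
    | some c =>
      simp only [List.foldl_cons, h]
      rw [ih]
      simp only [pvNames_cons, h, beq_iff_eq, decide_eq_true_eq, Prod.mk.injEq]
      exact ⟨app_if _ _ _ _, app_if _ _ _ _, app_if _ _ _ _, app_if _ _ _ _, app_if _ _ _ _⟩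

-- ===== VERDICT (by name: the statement is the Claim_ definition above) =====
theorem get_customer_order_count_spec : Claim_equal_get_customer_order_count := by
  intro xs _ _
  unfold Spec_get_customer_order_count get_customer_order_count get_customer_order_count_alt
  simpa using foldA_eq xs [] [] [] [] []
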